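-- pv_equiv track=rewrite | github.com/Pelmeshek1706/willis_2_airest | scripts/preprocessing/gemma_hybrid_role_cleanup.py | summarize_span_roles
-- ===== SOURCE A (Python) =====
-- from typing import Any, Dict, Iterable, List, Optional, Tuple
--
-- ROLE_MIXED = "mixed"
--
-- ROLE_UNKNOWN = "unknown"
--
-- def summarize_span_roles(spans: List[Dict[str, Any]]) -> str:
--     concrete = {span["role"] for span in spans if span["role"] != ROLE_UNKNOWN}
--     has_unknown = any(span["role"] == ROLE_UNKNOWN for span in spans)
--     if len(concrete) == 1 and not has_unknown:
--         return next(iter(concrete))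
--     if len(concrete) == 0:
--         return ROLE_UNKNOWN
--     if len(concrete) == 1 and has_unknown:
--         return ROLE_UNKNOWN
--     return ROLE_MIXED
-- ===== SOURCE B (Python) =====
-- ROLE_MIXED = "mixed"
-- ROLE_UNKNOWN = "unknown"
--
-- def summarize_span_roles(spans):
--     first_role = None
--     multiple_concrete = False
--     has_unknown = False
--     for span in spans:
--         role = span["role"]
--         if role == ROLE_UNKNOWN:
--             has_unknown = True
--         elif first_role is None:
--             first_role = role
--         elif role != first_role:
--             multiple_concrete = True
--     if multiple_concrete:
--         return ROLE_MIXED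
--     if first_role is not None and not has_unknown:
--         return first_role
--     return ROLE_UNKNOWN
-- ===== Notes on version B (the rewrite author's own statement) =====
-- stated objective: simpler
-- what changed: Replaces A's set comprehension plus a second any() pass with a single loop over the spans maintaining three scalars (first concrete role, a multiple-concrete flag, a has-unknown flag), followed by a three-way decision.
import Mathlib
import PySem

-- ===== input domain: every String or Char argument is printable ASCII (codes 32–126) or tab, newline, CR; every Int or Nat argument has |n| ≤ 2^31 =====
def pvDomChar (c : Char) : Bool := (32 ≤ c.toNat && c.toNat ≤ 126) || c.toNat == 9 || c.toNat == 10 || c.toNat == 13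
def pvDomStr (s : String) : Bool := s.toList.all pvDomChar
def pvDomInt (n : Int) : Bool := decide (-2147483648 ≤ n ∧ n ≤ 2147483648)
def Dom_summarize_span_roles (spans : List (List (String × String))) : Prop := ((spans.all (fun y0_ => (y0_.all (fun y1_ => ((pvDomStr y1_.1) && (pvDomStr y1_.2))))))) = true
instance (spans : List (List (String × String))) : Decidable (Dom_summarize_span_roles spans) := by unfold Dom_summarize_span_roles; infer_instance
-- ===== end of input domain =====

-- B replaces A's set comprehension + second any() pass by one loop with three scalar flags (simpler decomposition, same O(n) cost).


-- span["role"]: dict lookup; total form used under Pre_, which guarantees the key is present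
def pvRole (span : List (String × String)) : String :=
  ((PySem.Dict.mk span).get? "role").getD ""

-- ===== PORT A =====
def summarize_span_roles (spans : List (List (String × String))) : String :=
  let concrete : PySem.Set String :=
    PySem.Set.ofList ((spans.filter (fun s => !(pvRole s == "unknown"))).map pvRole)
  let has_unknown : Bool := spans.any (fun s => pvRole s == "unknown")
  if concrete.length == 1 && !has_unknown then concrete.headD ""  -- next(iter(concrete)): singleton, order-independent
  else if concrete.length == 0 then "unknown"
  else if concrete.length == 1 && has_unknown then "unknown"
  else "mixed"

-- ===== PORT B =====
def pvStep (st : Option String × Bool × Bool) (span : List (String × String)) :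
    Option String × Bool × Bool :=
  let role := pvRole span
  if role == "unknown" then (st.1, st.2.1, true)
  else match st.1 with
    | none => (some role, st.2.1, st.2.2)
    | some x => (some x, st.2.1 || !(role == x), st.2.2)

def summarize_span_roles_alt (spans : List (List (String × String))) : String :=
  let st := spans.foldl pvStep (none, false, false)
  if st.2.1 then "mixed"
  else match st.1 with
    | some x => if !st.2.2 then x else "unknown"
    | none => "unknown"

-- ===== PRECONDITION & SPEC =====
-- Pre_ excludes exactly the spans missing the "role" key, on which Python's span["role"] raises KeyError in both A and B.
def Pre_summarize_span_roles (spans : List (List (String × String))) : Prop :=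
  ∀ s ∈ spans, ((PySem.Dict.mk s).get? "role").isSome = true
instance (spans : List (List (String × String))) : Decidable (Pre_summarize_span_roles spans) := by unfold Pre_summarize_span_roles; infer_instance

def pvWitness_summarize_span_roles : (List (List (String × String))) :=
  [[("role", "tool")], [("role", "unknown")]]

def Spec_summarize_span_roles (spans : List (List (String × String))) (out : String) : Prop := out = summarize_span_roles_alt spans
instance (spans : List (List (String × String))) (out : String) : Decidable (Spec_summarize_span_roles spans out) := by unfold Spec_summarize_span_roles; infer_instance

-- ===== CLAIM (what is proved, stated in full; the proofs are below) =====
def Claim_equal_summarize_span_roles : Prop := ∀ (spans : List (List (String × String))), Dom_summarize_span_roles spans → Pre_summarize_span_roles spans → Spec_summarize_span_roles spans (summarize_span_roles spans)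

-- ===== LEMMAS AND PROOFS =====

-- B's fold once a concrete first role x is fixed
theorem foldl_pvStep_some (spans : List (List (String × String))) (x : String) (m h : Bool) :
    spans.foldl pvStep (some x, m, h) =
      (some x,
       m || ((spans.map pvRole).filter (fun r => !(r == "unknown"))).any (fun r => !(r == x)),
       h || spans.any (fun s => pvRole s == "unknown")) := by
  induction spans generalizing m h with
  | nil => simp
  | cons s t ih =>
    simp only [List.foldl_cons, List.map_cons, List.filter_cons, List.any_cons, pvStep]
    by_cases hu : pvRole s == "unknown"
    · simp [hu, ih]
    · simp only [Bool.not_eq_true] at hu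
      simp [hu, ih, Bool.or_assoc]

-- B's fold from the initial state
theorem foldl_pvStep_none (spans : List (List (String × String))) (h : Bool) :
    spans.foldl pvStep (none, false, h) =
      match ((spans.map pvRole).filter (fun r => !(r == "unknown"))) with
      | [] => (none, false, h || spans.any (fun s => pvRole s == "unknown"))
      | c :: t => (some c, t.any (fun r => !(r == c)),
                   h || spans.any (fun s => pvRole s == "unknown")) := by
  induction spans generalizing h with
  | nil => simp
  | cons s t ih =>
    simp only [List.foldl_cons, List.map_cons, List.filter_cons, List.any_cons, pvStep]
    by_cases hu : pvRole s == "unknown"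
    · simp [hu, ih]
    · simp only [Bool.not_eq_true] at hu
      simp [hu, foldl_pvStep_some]

-- A's set of concrete roles, as a function of the filtered role list
theorem ofList_const (c : String) (t : List String) (h : ∀ r ∈ t, r = c) :
    PySem.Set.ofList (c :: t) = [c] := by
  induction t with
  | nil => rfl
  | cons a l ih =>
    have ha : a = c := h a List.mem_cons_self
    subst ha
    have h1 : PySem.Set.ofList (a :: a :: l) = PySem.Set.ofList (a :: l) := by
      simp [PySem.Set.ofList_eq_foldl, List.foldl_cons, PySem.Set.add, PySem.Set.contains]
    rw [h1]
    exact ih (fun r hr => h r (List.mem_cons_of_mem _ hr))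

theorem ofList_head_ex (c : String) (t : List String) :
    ∃ l, PySem.Set.ofList (c :: t) = c :: l := by
  have key : ∀ (t : List String) (acc : List String),
      ∃ l, List.foldl PySem.Set.add (c :: acc) t = c :: l := by
    intro t
    induction t with
    | nil => intro acc; exact ⟨acc, rfl⟩
    | cons x t ih =>
      intro acc
      rw [List.foldl_cons]
      have hstep : ∃ acc', PySem.Set.add (c :: acc) x = c :: acc' := by
        unfold PySem.Set.add
        split
        · exact ⟨acc, rfl⟩
        · exact ⟨acc ++ [x], rfl⟩
      rcases hstep with ⟨acc', h'⟩
      rw [h']; exact ih acc' 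
  have h0 : PySem.Set.ofList (c :: t) = List.foldl PySem.Set.add [c] t := by
    rw [PySem.Set.ofList_eq_foldl]; rfl
  rw [h0]; exact key t []

theorem ofList_singleton_iff (c : String) (t : List String) :
    ((PySem.Set.ofList (c :: t)).length = 1) ↔ t.any (fun r => !(r == c)) = false := by
  constructor
  · intro hlen
    rw [List.any_eq_false]
    intro r hr
    simp only [Bool.not_eq_true', Bool.not_eq_false, beq_iff_eq]
    rcases List.length_eq_one_iff.mp hlen with ⟨a, ha⟩
    have hmem : r ∈ PySem.Set.ofList (c :: t) := by
      rw [PySem.Set.mem_ofList]; exact List.mem_cons_of_mem _ hr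
    have hmemc : c ∈ PySem.Set.ofList (c :: t) := by
      rw [PySem.Set.mem_ofList]; exact List.mem_cons_self
    rw [ha] at hmem hmemc
    simp at hmem hmemc
    rw [hmem, hmemc]
  · intro hall
    have h : ∀ r ∈ t, r = c := by
      rw [List.any_eq_false] at hall
      intro r hr
      have := hall r hr
      simpa using this
    rw [ofList_const c t h]
    rfl

theorem ofList_head (c : String) (t : List String) :
    (PySem.Set.ofList (c :: t)).head? = some c := by
  rcases ofList_head_ex c t with ⟨l, hl⟩
  rw [hl]; rfl

theorem ofList_ne_nil (c : String) (t : List String) :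
    PySem.Set.ofList (c :: t) ≠ [] := by
  rcases ofList_head_ex c t with ⟨l, hl⟩
  rw [hl]; simp

-- ===== VERDICT (by name: the statement is the Claim_ definition above) =====
theorem summarize_span_roles_spec : Claim_equal_summarize_span_roles := by
  intro spans _ _
  unfold Spec_summarize_span_roles summarize_span_roles summarize_span_roles_alt
  have hmap : (spans.filter (fun s => !(pvRole s == "unknown"))).map pvRole
      = (spans.map pvRole).filter (fun r => !(r == "unknown")) := by
    simp [List.filter_map, Function.comp_def]
  rw [hmap, foldl_pvStep_none]
  cases hc : (spans.map pvRole).filter (fun r => !(r == "unknown")) with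
  | nil => simp
  | cons c t =>
    simp only []
    by_cases hm : t.any (fun r => !(r == c)) = true
    · have hlen : (PySem.Set.ofList (c :: t)).length ≠ 1 := by
        intro h; rw [ofList_singleton_iff] at h; simp [h] at hm
      have hnil := ofList_ne_nil c t
      simp [hm, hlen, List.length_eq_zero_iff, hnil]
    · have hm' : t.any (fun r => !(r == c)) = false := by simpa using hm
      have hlen : (PySem.Set.ofList (c :: t)).length = 1 := (ofList_singleton_iff c t).2 hm'
      have hhead := ofList_head c t
      by_cases hu : spans.any (fun s => pvRole s == "unknown")
      · simp [hm', hlen, hu]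
      · simp only [Bool.not_eq_true] at hu
        simp [hm', hlen, hu, hhead]
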